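-- pv_equiv track=rewrite | github.com/Mohaddeseh-Tabrizian/-HackerRank | kindergarden_adventures/Kindergarden_Adventure.py | fill_dic_with_ranges
-- ===== SOURCE A (Python) =====
-- def fill_dic_with_ranges(finished_students, f, s, n):
--     for seat in range(n):
--         if seat in f:
--             finished_students[seat] += 1
--         elif seat in s:
--             finished_students[seat] += 1
--         else:
--             finished_students[seat] -= 1
--
--     return finished_students
-- ===== SOURCE B (Python) =====
-- def fill_dic_with_ranges(finished_students, f, s, n):
--     # pass 1: every seat in range loses a point (baseline)
--     for seat in range(n):
--         finished_students[seat] -= 1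
--     # pass 2: each distinct member of f or s whose seat is in range gets the point back plus one
--     for seat in set(f) | set(s):
--         if 0 <= seat < n:
--             finished_students[seat] += 2
--     return finished_students
-- ===== Notes on version B (the rewrite author's own statement) =====
-- stated objective: alternative
-- what changed: A decides each seat's delta inside one loop via membership tests; B uses two staged passes: a first loop subtracts 1 from every seat in range, then a second loop over the deduplicated union of f and s adds 2 back to each member seat that lies in [0,n).
import Mathlib
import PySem

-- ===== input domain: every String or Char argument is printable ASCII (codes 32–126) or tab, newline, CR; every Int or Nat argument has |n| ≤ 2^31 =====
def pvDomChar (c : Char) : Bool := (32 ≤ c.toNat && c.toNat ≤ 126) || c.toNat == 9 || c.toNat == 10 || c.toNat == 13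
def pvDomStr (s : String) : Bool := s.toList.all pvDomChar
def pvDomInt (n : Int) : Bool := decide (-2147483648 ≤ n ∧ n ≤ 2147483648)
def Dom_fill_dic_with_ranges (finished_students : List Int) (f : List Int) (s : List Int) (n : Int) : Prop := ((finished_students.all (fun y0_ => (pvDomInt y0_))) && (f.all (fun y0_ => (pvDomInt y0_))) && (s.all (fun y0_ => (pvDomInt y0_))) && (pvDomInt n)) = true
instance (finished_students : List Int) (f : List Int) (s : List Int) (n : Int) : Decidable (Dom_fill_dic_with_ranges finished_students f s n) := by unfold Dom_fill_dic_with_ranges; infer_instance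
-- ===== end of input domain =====

-- B replaces A's single membership-testing loop by two staged passes: a baseline loop
-- subtracting 1 from every seat in range, then a loop over the deduplicated union of f
-- and s adding 2 to each member seat in [0, n). A mutates finished_students in place;
-- the equivalence proved here is about the RETURN value only.


-- ===== PORT A =====
-- one iteration of A's loop body; the `none` branch is Python's IndexError, excluded by Pre_
def fillStepA (f s : List Int) (st : List Int) (seat : Int) : List Int :=
  match PySem.List.pyGet? st seat with
  | none => st
  | some v =>
    if seat ∈ f then PySem.List.pySetD st seat (v + 1)
    else if seat ∈ s then PySem.List.pySetD st seat (v + 1)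
    else PySem.List.pySetD st seat (v - 1)

def fill_dic_with_ranges (finished_students : List Int) (f : List Int) (s : List Int) (n : Int) : List Int :=
  (PySem.List.pyRange 0 n 1).foldl (fillStepA f s) finished_students

-- ===== PORT B =====
-- pass 1 body: finished_students[seat] -= 1 (`none` = IndexError, excluded by Pre_)
def baseStepB (st : List Int) (seat : Int) : List Int :=
  match PySem.List.pyGet? st seat with
  | none => st
  | some v => PySem.List.pySetD st seat (v - 1)

-- pass 2 body: if 0 <= seat < n: finished_students[seat] += 2
def bonusStepB (n : Int) (st : List Int) (seat : Int) : List Int :=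
  if 0 ≤ seat ∧ seat < n then
    match PySem.List.pyGet? st seat with
    | none => st
    | some v => PySem.List.pySetD st seat (v + 2)
  else st

def fill_dic_with_ranges_alt (finished_students : List Int) (f : List Int) (s : List Int) (n : Int) : List Int :=
  let base := (PySem.List.pyRange 0 n 1).foldl baseStepB finished_students
  let members : PySem.Set Int := PySem.Set.union (PySem.Set.ofList f) (PySem.Set.ofList s)
  members.foldl (bonusStepB n) base

-- ===== PRECONDITION & SPEC =====
-- A indexes finished_students[seat] for every seat in range(n): it raises IndexError iff n > len.
def Pre_fill_dic_with_ranges (finished_students : List Int) (f : List Int) (s : List Int) (n : Int) : Prop :=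
  n ≤ (finished_students.length : Int)
instance (finished_students : List Int) (f : List Int) (s : List Int) (n : Int) : Decidable (Pre_fill_dic_with_ranges finished_students f s n) := by unfold Pre_fill_dic_with_ranges; infer_instance

def pvWitness_fill_dic_with_ranges : List Int × List Int × List Int × Int := ([3, 0, -2], [0, 5], [2], 3)

def Spec_fill_dic_with_ranges (finished_students : List Int) (f : List Int) (s : List Int) (n : Int) (out : List Int) : Prop := out = fill_dic_with_ranges_alt finished_students f s n
instance (finished_students : List Int) (f : List Int) (s : List Int) (n : Int) (out : List Int) : Decidable (Spec_fill_dic_with_ranges finished_students f s n out) := by unfold Spec_fill_dic_with_ranges; infer_instance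

-- ===== CLAIM (what is proved, stated in full; the proofs are below) =====
def Claim_equal_fill_dic_with_ranges : Prop := ∀ (finished_students : List Int) (f : List Int) (s : List Int) (n : Int), Dom_fill_dic_with_ranges finished_students f s n → Pre_fill_dic_with_ranges finished_students f s n → Spec_fill_dic_with_ranges finished_students f s n (fill_dic_with_ranges finished_students f s n)

-- ===== LEMMAS AND PROOFS =====

-- generic in-place loop body: st[seat] := g seat st[seat]
def stepG (g : Int → Int → Int) (st : List Int) (seat : Int) : List Int :=
  match PySem.List.pyGet? st seat with
  | none => st
  | some v => PySem.List.pySetD st seat (g seat v)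

-- the per-seat adjustment of A
def gA (f s : List Int) (seat v : Int) : Int :=
  if seat ∈ f then v + 1 else if seat ∈ s then v + 1 else v - 1

lemma stepA_eq (f s : List Int) : fillStepA f s = stepG (gA f s) := by
  funext st seat
  simp only [fillStepA, stepG, gA]
  cases PySem.List.pyGet? st seat with
  | none => rfl
  | some v => split_ifs <;> rfl

lemma stepB1_eq : baseStepB = stepG (fun _ v => v - 1) := rfl

-- A loop of stepG over seats [pre.length, pre.length + k) on pre ++ rest maps g over the first k of rest
lemma loopG (g : Int → Int → Int) : ∀ (k : Nat) (pre rest : List Int), k ≤ rest.length →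
    (PySem.List.pyRange (pre.length : Int) ((pre.length : Int) + k) 1).foldl (stepG g) (pre ++ rest)
    = pre ++ (PySem.List.enumerate (rest.take k) (pre.length : Int)).map (fun p => g p.1 p.2) ++ rest.drop k := by
  intro k
  induction k with
  | zero =>
    intro pre rest _
    simp [PySem.List.pyRange_one_eq_nil, PySem.List.enumerate_nil]
  | succ k ih =>
    intro pre rest hk
    cases rest with
    | nil => simp at hk
    | cons x rest' =>
      rw [PySem.List.pyRange_one_cons (by omega)]
      simp only [List.foldl_cons]
      have hstep : stepG g (pre ++ x :: rest') (pre.length : Int)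
          = (pre ++ [g (pre.length : Int) x]) ++ rest' := by
        have hget : PySem.List.pyGet? (pre ++ x :: rest') (pre.length : Int) = some x := by
          simp
        simp only [stepG, hget, PySem.List.pySetD_natCast]
        simp
      rw [hstep]
      have h1 : ((pre.length : Int) + 1) = (((pre ++ [g (pre.length : Int) x]).length : Int)) := by simp
      have h2 : ((pre.length : Int) + ((k + 1 : Nat) : Int)) = (((pre ++ [g (pre.length : Int) x]).length : Int) + (k : Int)) := by
        simp; ring
      rw [h1, h2, ih (pre ++ [g (pre.length : Int) x]) rest' (by simpa using hk)]
      simp [PySem.List.enumerate_cons, List.append_assoc]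

-- the full run of a stepG loop over range(n), n ≤ len
lemma runG (g : Int → Int → Int) (fs : List Int) (n : Int) (h : n ≤ (fs.length : Int)) :
    (PySem.List.pyRange 0 n 1).foldl (stepG g) fs
    = (PySem.List.enumerate (fs.take n.toNat) 0).map (fun p => g p.1 p.2) ++ fs.drop n.toNat := by
  by_cases hn : n ≤ 0
  · rw [PySem.List.pyRange_one_eq_nil hn]
    have : n.toNat = 0 := by omega
    simp [this, PySem.List.enumerate_nil]
  · have hk : n = ((n.toNat : Nat) : Int) := by omega
    have hkl : n.toNat ≤ fs.length := by omega
    have hA := loopG g n.toNat [] fs hkl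
    simp only [List.length_nil, Nat.cast_zero, zero_add, List.nil_append] at hA
    rw [hk, hA]
    simp only [Int.toNat_natCast]

lemma length_bonusStep (n : Int) (st : List Int) (x : Int) :
    (bonusStepB n st x).length = st.length := by
  simp only [bonusStepB]
  split_ifs with h
  · cases hg : PySem.List.pyGet? st x with
    | none => rfl
    | some v =>
      simp only [PySem.List.pySetD_of_nonneg _ _ h.1]
      simp
  · rfl

lemma getElem?_bonusStep (n : Int) (st : List Int) (x : Int) (hn : n ≤ (st.length : Int)) (j : Nat) :
    (bonusStepB n st x)[j]? = st[j]?.map (fun v => v + if ((j : Int) = x ∧ (j : Int) < n) then 2 else 0) := by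
  simp only [bonusStepB]
  by_cases hc : (j : Int) = x ∧ (j : Int) < n
  · have h0 : 0 ≤ x ∧ x < n := ⟨by omega, by omega⟩
    have hjlen : j < st.length := by omega
    have hx : x = ((j : Nat) : Int) := hc.1.symm
    rw [if_pos h0, hx]
    have hget : PySem.List.pyGet? st ((j : Nat) : Int) = some st[j] := by
      rw [PySem.List.pyGet?_natCast, List.getElem?_eq_getElem hjlen]
    rw [hget]
    simp only [PySem.List.pySetD_natCast]
    rw [List.getElem?_set_eq_of_lt _ hjlen, List.getElem?_eq_getElem hjlen]
    simp only [Option.map_some]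
    simp [hc.2]
  · rw [if_neg hc]
    split_ifs with h0
    · -- branch taken but j ≠ x (or ¬ x < n, impossible here)
      have hxn : x < n := h0.2
      have hxlen : x.toNat < st.length := by omega
      have hget : PySem.List.pyGet? st x = some st[x.toNat] := by
        have hx : x = ((x.toNat : Nat) : Int) := by omega
        conv_lhs => rw [hx]
        rw [PySem.List.pyGet?_natCast, List.getElem?_eq_getElem hxlen]
      rw [hget]
      simp only [PySem.List.pySetD_of_nonneg _ _ h0.1]
      have hne : j ≠ x.toNat := by
        intro he; apply hc; constructor <;> omega
      rw [List.getElem?_set_ne (by omega)]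
      cases st[j]? <;> simp
    · cases st[j]? <;> simp

lemma getElem?_bonusFold (n : Int) : ∀ (L : List Int), L.Nodup → ∀ (st : List Int), n ≤ (st.length : Int) → ∀ (j : Nat),
    (L.foldl (bonusStepB n) st)[j]? = st[j]?.map (fun v => v + if ((j : Int) ∈ L ∧ (j : Int) < n) then 2 else 0) := by
  intro L
  induction L with
  | nil =>
    intro _ st _ j
    simp
  | cons x L ih =>
    intro hnd st hn j
    have hxnotin : x ∉ L := (List.nodup_cons.mp hnd).1
    have hlen : n ≤ ((bonusStepB n st x).length : Int) := by
      rw [length_bonusStep]; exact hn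
    simp only [List.foldl_cons]
    rw [ih (List.nodup_cons.mp hnd).2 _ hlen j, getElem?_bonusStep n st x hn j]
    cases st[j]? with
    | none => rfl
    | some v =>
      simp only [Option.map_some]
      congr 1
      simp only [List.mem_cons]
      by_cases hjx : (j : Int) = x
      · have hjL : (j : Int) ∉ L := hjx ▸ hxnotin
        by_cases hjn : (j : Int) < n
        · rw [if_pos ⟨hjx, hjn⟩, if_neg (fun h => hjL h.1), if_pos ⟨Or.inl hjx, hjn⟩]; ring
        · rw [if_neg (fun h => hjn h.2), if_neg (fun h => hjn h.2), if_neg (fun h => hjn h.2)]; ring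
      · rw [if_neg (fun h => hjx h.1)]
        by_cases hjL : (j : Int) ∈ L ∧ (j : Int) < n
        · rw [if_pos hjL, if_pos ⟨Or.inr hjL.1, hjL.2⟩]; ring
        · rw [if_neg hjL, if_neg (fun h => hjL ⟨h.1.resolve_left hjx, h.2⟩)]; ring

-- ===== VERDICT (by name: the statement is the Claim_ definition above) =====
theorem fill_dic_with_ranges_spec : Claim_equal_fill_dic_with_ranges := by
  intro fs f s n _ hpre
  have hlen : n ≤ (fs.length : Int) := hpre
  unfold Spec_fill_dic_with_ranges fill_dic_with_ranges fill_dic_with_ranges_alt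
  rw [stepA_eq, stepB1_eq, runG _ _ _ hlen, runG _ _ _ hlen]
  set k := n.toNat with hkdef
  set members : PySem.Set Int := PySem.Set.union (PySem.Set.ofList f) (PySem.Set.ofList s) with hm
  have hknat : k ≤ fs.length := by omega
  have hbaseLen : ((((PySem.List.enumerate (fs.take k) 0).map (fun p : Int × Int => p.2 - 1) ++ fs.drop k)).length : Int) = (fs.length : Int) := by
    simp [PySem.List.length_enumerate, min_eq_left hknat]
    omega
  have hnodup : members.Nodup := PySem.Set.nodup_union _ _ (PySem.Set.nodup_ofList f)
  apply List.ext_getElem?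
  intro j
  rw [getElem?_bonusFold n members hnodup _ (by rw [hbaseLen]; exact hlen) j]
  have hmapA : ((PySem.List.enumerate (fs.take k) 0).map (fun p => gA f s p.1 p.2)).length = min k fs.length := by
    simp [PySem.List.length_enumerate]
  have hmapB : ((PySem.List.enumerate (fs.take k) 0).map (fun p => p.2 - 1)).length = min k fs.length := by
    simp [PySem.List.length_enumerate]
  by_cases hj : j < k
  · have hjfs : j < fs.length := by omega
    have hjmin : j < min k fs.length := by omega
    have hjn : (j : Int) < n := by omega
    rw [List.getElem?_append_left (by omega), List.getElem?_append_left (by omega)]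
    rw [List.getElem?_map, List.getElem?_map, PySem.List.getElem?_enumerate]
    have htake : (fs.take k)[j]? = some fs[j] := by
      rw [List.getElem?_take_of_lt hj, List.getElem?_eq_getElem hjfs]
    rw [htake]
    have hmem : ((j : Int) ∈ members ∧ (j : Int) < n) ↔ ((j : Int) ∈ f ∨ (j : Int) ∈ s) := by
      rw [hm]
      constructor
      · intro ⟨h1, _⟩
        rcases (PySem.Set.mem_union _ _ _).mp h1 with h | h
        · exact Or.inl ((PySem.Set.mem_ofList _ _).mp h)
        · exact Or.inr ((PySem.Set.mem_ofList _ _).mp h)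
      · intro h
        refine ⟨(PySem.Set.mem_union _ _ _).mpr ?_, hjn⟩
        rcases h with h | h
        · exact Or.inl ((PySem.Set.mem_ofList _ _).mpr h)
        · exact Or.inr ((PySem.Set.mem_ofList _ _).mpr h)
    simp only [Option.map_some, Option.some.injEq, gA]
    by_cases hf : (j : Int) ∈ f
    · have : ((j : Int) ∈ members ∧ (j : Int) < n) := hmem.mpr (Or.inl hf)
      simp [hf, this]; ring
    · by_cases hs : (j : Int) ∈ s
      · have : ((j : Int) ∈ members ∧ (j : Int) < n) := hmem.mpr (Or.inr hs)
        simp [hf, hs, this]; ring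
      · have : ¬ ((j : Int) ∈ members ∧ (j : Int) < n) := by
          intro hcon; rcases hmem.mp hcon with h | h <;> [exact hf h; exact hs h]
        simp [hf, hs, this]
  · have hjn : ¬ ((j : Int) < n) := by omega
    rw [List.getElem?_append_right (by omega), List.getElem?_append_right (by omega)]
    rw [hmapA, hmapB, min_eq_left hknat]
    simp only [hjn, and_false, if_false]
    cases (fs.drop k)[j - k]? <;> simp
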